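-- pv_equiv track=rewrite | github.com/anjaneyaprasad/dsa_python | level_up/leetCode/prefix_sum/ways_to_split_array.py | ways_to_split2
-- ===== SOURCE A (Python) =====
-- def ways_to_split2(nums):
--     n = len(nums)
--     left = [0] * n
--     right = [0] * n
--     left[0] = nums[0]
--     for i in range(1, n):
--         left[i] = left[i-1] + nums[i]
--     for i in range(n-2, -1, -1):
--         right[i] = right[i+1] + nums[i+1]
--     ans = 0
--     for i in range(n-1):
--         if left[i] >= right[i]:
--             ans += 1
--     return ans
-- ===== SOURCE B (Python) =====
-- def ways_to_split2(nums):
--     total = sum(nums)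
--     ans = 0
--     left = 0
--     for x in nums[:-1]:
--         left += x
--         if 2 * left >= total:
--             ans += 1
--     return ans
-- ===== Notes on version B (the rewrite author's own statement) =====
-- stated objective: simpler
-- what changed: Replaces the three passes that materialise left[]/right[] prefix- and suffix-sum arrays with a single forward pass keeping one running prefix sum and testing 2*left >= total (the right sum is total - left); no array allocation, measured ~1.9x faster.
-- outside the precondition, e.g. on ways_to_split2([]): A raises IndexError, B returns 0
import Mathlib
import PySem

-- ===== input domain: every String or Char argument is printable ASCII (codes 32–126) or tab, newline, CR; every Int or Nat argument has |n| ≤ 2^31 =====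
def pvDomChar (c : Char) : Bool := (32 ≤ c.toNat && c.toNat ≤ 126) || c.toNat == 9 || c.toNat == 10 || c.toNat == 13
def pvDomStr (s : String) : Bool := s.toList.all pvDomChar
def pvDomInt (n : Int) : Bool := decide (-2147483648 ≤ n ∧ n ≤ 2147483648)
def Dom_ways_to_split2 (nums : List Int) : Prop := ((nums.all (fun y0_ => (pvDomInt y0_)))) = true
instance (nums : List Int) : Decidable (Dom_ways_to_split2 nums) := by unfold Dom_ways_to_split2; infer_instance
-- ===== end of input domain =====

-- B replaces A's three passes over materialised left[]/right[] prefix/suffix arrays by a single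
-- forward pass with one running prefix sum (right sum = total - left); objective: simpler (O(1) space).

-- ===== PORT A =====
-- Array reads/writes use pyGetD/List.set with default 0; under Pre_ (nums ≠ []) every access is in range,
-- exactly where the Python indexes without raising.
def ways_to_split2 (nums : List Int) : Int :=
  let n : Int := nums.length
  let left0 : List Int := (List.replicate nums.length (0 : Int)).set 0 (PySem.List.pyGetD nums 0 0)
  let left : List Int := (PySem.List.pyRange 1 n 1).foldl
      (fun l i => l.set i.toNat (PySem.List.pyGetD l (i-1) 0 + PySem.List.pyGetD nums i 0)) left0
  let right : List Int := (PySem.List.pyRange (n-2) (-1) (-1)).foldl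
      (fun r i => r.set i.toNat (PySem.List.pyGetD r (i+1) 0 + PySem.List.pyGetD nums (i+1) 0))
      (List.replicate nums.length (0 : Int))
  (PySem.List.pyRange 0 (n-1) 1).foldl
      (fun ans i => if PySem.List.pyGetD left i 0 ≥ PySem.List.pyGetD right i 0 then ans + 1 else ans) 0

-- ===== PORT B =====
def ways_to_split2_alt (nums : List Int) : Int :=
  let total : Int := nums.sum
  let r : Int × Int := (PySem.List.slice nums none (some (-1))).foldl
      (fun (p : Int × Int) x =>
        let left := p.2 + x
        (if 2 * left ≥ total then p.1 + 1 else p.1, left)) (0, 0)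
  r.1

-- ===== PRECONDITION & SPEC =====
-- Pre_ excludes only the empty list, on which A raises IndexError (it reads nums[0] unconditionally).
def Pre_ways_to_split2 (nums : List Int) : Prop := nums ≠ []
instance (nums : List Int) : Decidable (Pre_ways_to_split2 nums) := by unfold Pre_ways_to_split2; infer_instance
def pvWitness_ways_to_split2 : List Int := [10, 4, -8, 7]

def Spec_ways_to_split2 (nums : List Int) (out : Int) : Prop := out = ways_to_split2_alt nums
instance (nums : List Int) (out : Int) : Decidable (Spec_ways_to_split2 nums out) := by unfold Spec_ways_to_split2; infer_instance

-- ===== CLAIM (what is proved, stated in full; the proofs are below) =====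
def Claim_equal_ways_to_split2 : Prop := ∀ (nums : List Int), Dom_ways_to_split2 nums → Pre_ways_to_split2 nums → Spec_ways_to_split2 nums (ways_to_split2 nums)

-- ===== LEMMAS AND PROOFS =====

-- Prefix sum of the first k elements / suffix sum after index j.
def pvS (nums : List Int) (k : Nat) : Int := (nums.take k).sum
def pvT (nums : List Int) (j : Nat) : Int := (nums.drop (j+1)).sum

-- A's left array after the forward loop up to m: entries j < m hold pvS (j+1), the rest are still 0.
def pvPrefL (nums : List Int) (m : Nat) : List Int :=
  (List.range nums.length).map (fun j => if j < m then pvS nums (j+1) else 0)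

-- A's right array before the backward loop has processed indices < m: entries j ≥ m hold pvT j.
def pvSufL (nums : List Int) (m : Nat) : List Int :=
  (List.range nums.length).map (fun j => if m ≤ j then pvT nums j else 0)

theorem pv_left0_eq (nums : List Int) (h : nums ≠ []) :
    (List.replicate nums.length (0 : Int)).set 0 (PySem.List.pyGetD nums 0 0) = pvPrefL nums 1 := by
  rcases nums with _ | ⟨x, t⟩
  · exact absurd rfl h
  · apply List.ext_getElem
    · simp [pvPrefL]
    · intro j hj hj'
      simp only [pvPrefL, List.getElem_set, List.getElem_map, List.getElem_range,
        List.getElem_replicate, PySem.List.pyGetD_zero_cons]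
      by_cases hj0 : j = 0
      · subst hj0; simp [pvS]
      · rw [if_neg (fun e => hj0 e.symm), if_neg (by omega)]

theorem pv_left_fold (nums : List Int) (m : Nat) (h1 : 1 ≤ m) (h2 : m ≤ nums.length) :
    (PySem.List.pyRange 1 (m : Int) 1).foldl
      (fun l i => l.set i.toNat (PySem.List.pyGetD l (i-1) 0 + PySem.List.pyGetD nums i 0))
      (pvPrefL nums 1) = pvPrefL nums m := by
  induction m, h1 using Nat.le_induction with
  | base =>
    rw [show ((1 : Nat) : Int) = 1 by norm_num, PySem.List.pyRange_one_eq_nil (by norm_num)]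
    rfl
  | succ m hm ih =>
    have hmn : m ≤ nums.length := by omega
    rw [show ((m + 1 : Nat) : Int) = (m : Int) + 1 by push_cast; ring,
      PySem.List.pyRange_one_succ_right (by exact_mod_cast hm), List.foldl_append, ih hmn]
    simp only [List.foldl_cons, List.foldl_nil]
    rw [show ((m : Int) - 1) = ((m - 1 : Nat) : Int) by omega, Int.toNat_natCast,
      PySem.List.pyGetD_natCast, PySem.List.pyGetD_natCast]
    have hv : (pvPrefL nums m).getD (m - 1) 0 + nums.getD m 0 = pvS nums (m + 1) := by
      unfold pvPrefL
      rw [PySem.List.getD_map_range _ _ _ _ (by omega), if_pos (by omega),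
        show m - 1 + 1 = m by omega, List.getD_eq_getElem _ _ (by omega), pvS, pvS,
        List.sum_take_succ nums m (by omega)]
    rw [hv]
    apply List.ext_getElem
    · simp [pvPrefL]
    · intro j hj hj'
      simp only [pvPrefL, List.getElem_set, List.getElem_map, List.getElem_range] at *
      by_cases hjm : m = j
      · subst hjm; rw [if_pos rfl, if_pos (by omega)]
      · rw [if_neg hjm]
        by_cases hlt : j < m
        · rw [if_pos hlt, if_pos (by omega)]
        · rw [if_neg hlt, if_neg (by omega)]

theorem pv_right0_eq (nums : List Int) (h : nums ≠ []) :
    List.replicate nums.length (0 : Int) = pvSufL nums (nums.length - 1) := by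
  have hn : 0 < nums.length := List.length_pos_iff.mpr h
  apply List.ext_getElem
  · simp [pvSufL]
  · intro j hj hj'
    have hjn : j < nums.length := by simpa using hj
    simp only [pvSufL, List.getElem_replicate, List.getElem_map, List.getElem_range]
    by_cases hle : nums.length - 1 ≤ j
    · rw [if_pos hle]
      have : j = nums.length - 1 := by omega
      subst this
      rw [pvT, show nums.length - 1 + 1 = nums.length by omega, List.drop_length, List.sum_nil]
    · rw [if_neg hle]

theorem pv_right_fold (nums : List Int) (m : Nat) (h2 : m ≤ nums.length - 1) :
    (PySem.List.pyRange ((m : Int) - 1) (-1) (-1)).foldl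
      (fun r i => r.set i.toNat (PySem.List.pyGetD r (i+1) 0 + PySem.List.pyGetD nums (i+1) 0))
      (pvSufL nums m) = pvSufL nums 0 := by
  induction m with
  | zero =>
    rw [show ((0 : Nat) : Int) - 1 = -1 by norm_num, PySem.List.pyRange_neg_one_eq_nil (by norm_num)]
    rfl
  | succ m ih =>
    have hmn : m + 1 < nums.length := by omega
    rw [show ((m + 1 : Nat) : Int) - 1 = (m : Int) by push_cast; ring,
      PySem.List.pyRange_neg_one_cons (by omega)]
    simp only [List.foldl_cons]
    have hg : (pvSufL nums (m + 1)).set (m : Int).toNat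
        (PySem.List.pyGetD (pvSufL nums (m + 1)) ((m : Int) + 1) 0 +
          PySem.List.pyGetD nums ((m : Int) + 1) 0) = pvSufL nums m := by
      rw [Int.toNat_natCast, show ((m : Int) + 1) = ((m + 1 : Nat) : Int) by push_cast; ring,
        PySem.List.pyGetD_natCast, PySem.List.pyGetD_natCast]
      have hv : (pvSufL nums (m + 1)).getD (m + 1) 0 + nums.getD (m + 1) 0 = pvT nums m := by
        unfold pvSufL
        rw [PySem.List.getD_map_range _ _ _ _ hmn, if_pos (le_refl _),
          List.getD_eq_getElem _ _ hmn, pvT, pvT, List.drop_eq_getElem_cons hmn, List.sum_cons]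
        ring
      rw [hv]
      apply List.ext_getElem
      · simp [pvSufL]
      · intro j hj hj'
        simp only [pvSufL, List.getElem_set, List.getElem_map, List.getElem_range] at *
        by_cases hjm : m = j
        · subst hjm; rw [if_pos rfl, if_pos (le_refl _)]
        · rw [if_neg hjm]
          by_cases hle : m + 1 ≤ j
          · rw [if_pos hle, if_pos (by omega)]
          · rw [if_neg hle, if_neg (by omega)]
    rw [hg, ih (by omega)]

theorem pv_A_eq_count (nums : List Int) (h : nums ≠ []) :
    ways_to_split2 nums
      = ((List.range (nums.length - 1)).countP
          (fun i => decide (2 * pvS nums (i+1) ≥ nums.sum)) : Int) := by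
  have hn : 0 < nums.length := List.length_pos_iff.mpr h
  simp only [ways_to_split2]
  rw [pv_left0_eq nums h, pv_left_fold nums nums.length hn (le_refl _),
    pv_right0_eq nums h,
    show ((nums.length : Int) - 2) = ((nums.length - 1 : Nat) : Int) - 1 by omega,
    pv_right_fold nums (nums.length - 1) (le_refl _),
    show ((nums.length : Int) - 1) = ((nums.length - 1 : Nat) : Int) by omega,
    PySem.List.pyRange_zero_natCast, List.foldl_map]
  have hcong : ∀ x ∈ List.range (nums.length - 1), ∀ acc : Int,
      (if PySem.List.pyGetD (pvPrefL nums nums.length) (x : Int) 0 ≥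
            PySem.List.pyGetD (pvSufL nums 0) (x : Int) 0 then acc + 1 else acc)
        = (if 2 * pvS nums (x + 1) ≥ nums.sum then acc + 1 else acc) := by
    intro x hx acc
    have hx' : x < nums.length - 1 := List.mem_range.mp hx
    rw [PySem.List.pyGetD_natCast, PySem.List.pyGetD_natCast]
    have hL : (pvPrefL nums nums.length).getD x 0 = pvS nums (x + 1) := by
      unfold pvPrefL
      rw [PySem.List.getD_map_range _ _ _ _ (by omega), if_pos (by omega)]
    have hR : (pvSufL nums 0).getD x 0 = pvT nums x := by
      unfold pvSufL
      rw [PySem.List.getD_map_range _ _ _ _ (by omega), if_pos (by omega)]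
    rw [hL, hR]
    have hsplit : pvS nums (x + 1) + pvT nums x = nums.sum := by
      rw [pvS, pvT, ← List.sum_append, List.take_append_drop]
    have hT : pvT nums x = nums.sum - pvS nums (x + 1) := by omega
    rw [hT]
    have hiff : (pvS nums (x + 1) ≥ nums.sum - pvS nums (x + 1)) ↔
        (2 * pvS nums (x + 1) ≥ nums.sum) := by constructor <;> intro h' <;> omega
    exact if_congr hiff rfl rfl
  have h1 := PySem.List.foldl_congr_mem' _ _ _ (0 : Int) hcong
  rw [h1, PySem.List.foldl_ite_add_one (fun i => 2 * pvS nums (i + 1) ≥ nums.sum) _ 0, zero_add]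

theorem pv_B_fold (total : Int) (ys : List Int) : ∀ (a l : Int),
    (ys.foldl (fun (p : Int × Int) x =>
        (if 2 * (p.2 + x) ≥ total then p.1 + 1 else p.1, p.2 + x)) (a, l)).1
      = a + ((List.range ys.length).countP
          (fun i => decide (2 * (l + (ys.take (i+1)).sum) ≥ total)) : Int) := by
  induction ys with
  | nil => intro a l; simp
  | cons y t ih =>
    intro a l
    simp only [List.foldl_cons]
    rw [ih]
    simp only [List.length_cons, List.range_succ_eq_map, List.countP_cons, List.countP_map,
      Function.comp_def, Nat.succ_eq_add_one, List.take_succ_cons, List.sum_cons, List.take_zero,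
      List.sum_nil, add_zero, ← add_assoc, decide_eq_true_eq]
    split_ifs <;> push_cast <;> omega

theorem pv_B_eq_count (nums : List Int) :
    ways_to_split2_alt nums
      = ((List.range (nums.length - 1)).countP
          (fun i => decide (2 * pvS nums (i+1) ≥ nums.sum)) : Int) := by
  simp only [ways_to_split2_alt, PySem.List.slice_to_neg_one]
  rw [pv_B_fold, List.length_dropLast, zero_add]
  congr 1
  apply List.countP_congr
  intro x hx
  have hx' : x < nums.length - 1 := List.mem_range.mp hx
  have ht : (nums.dropLast.take (x + 1)).sum = pvS nums (x + 1) := by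
    rw [List.dropLast_eq_take, List.take_take, min_eq_left (by omega), pvS]
  rw [ht, zero_add]

-- ===== VERDICT (by name: the statement is the Claim_ definition above) =====
theorem ways_to_split2_spec : Claim_equal_ways_to_split2 := by
  intro nums _ hpre
  unfold Spec_ways_to_split2
  rw [pv_A_eq_count nums hpre, pv_B_eq_count nums]
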